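-- pv_equiv track=rewrite | github.com/miguel-faria/deep_rl | src/dl_envs/pursuit/pursuit_env.py | aggregate_obs
-- ===== SOURCE A (Python) =====
-- from typing import Tuple, List, Dict, Any, TypeVar
--
-- def aggregate_obs(hunter_obs: List, prey_obs: List) -> List:
-- 	final_obs = []
-- 	for idx in range(len(hunter_obs)):
-- 		ordered_hunter_obs = hunter_obs[idx].copy()
-- 		for elem in hunter_obs[:idx]:
-- 			ordered_hunter_obs += elem.copy()
-- 		for elem in hunter_obs[idx + 1:]:
-- 			ordered_hunter_obs += elem.copy()
-- 		final_obs += [ordered_hunter_obs + prey_obs]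
-- 	return final_obs
-- ===== SOURCE B (Python) =====
-- def aggregate_obs(hunter_obs, prey_obs):
--     # Flatten all hunter observations once and record segment offsets,
--     # then build each reordered vector by slicing the flat table.
--     all_flat = []
--     off = [0]
--     for obs in hunter_obs:
--         all_flat.extend(obs)
--         off.append(len(all_flat))
--     return [list(hunter_obs[i]) + all_flat[:off[i]] + all_flat[off[i + 1]:] + prey_obs
--             for i in range(len(hunter_obs))]
-- ===== Notes on version B (the rewrite author's own statement) =====
-- stated objective: alternative
-- what changed: Instead of A's per-index nested copy loops over the other hunters, B flattens all hunter observations once into a table with prefix offsets and builds each output by two slices of that table.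
import Mathlib
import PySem

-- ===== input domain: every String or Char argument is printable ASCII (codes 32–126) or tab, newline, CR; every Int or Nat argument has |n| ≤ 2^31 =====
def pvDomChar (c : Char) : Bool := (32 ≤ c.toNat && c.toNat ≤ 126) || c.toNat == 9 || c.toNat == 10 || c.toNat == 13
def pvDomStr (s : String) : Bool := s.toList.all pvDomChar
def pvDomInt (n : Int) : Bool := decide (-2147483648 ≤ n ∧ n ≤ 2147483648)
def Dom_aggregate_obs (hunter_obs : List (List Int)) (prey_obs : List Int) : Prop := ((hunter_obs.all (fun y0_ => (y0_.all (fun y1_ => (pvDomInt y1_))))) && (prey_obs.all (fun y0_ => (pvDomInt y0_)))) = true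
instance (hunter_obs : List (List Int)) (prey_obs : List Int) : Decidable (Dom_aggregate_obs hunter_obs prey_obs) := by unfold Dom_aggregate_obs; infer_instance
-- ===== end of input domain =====

-- B flattens all hunter observations once with a prefix-offset table and builds each
-- output by slicing that table, instead of A's per-index nested copy loops (objective: alternative decomposition, same cost).

-- ===== PORT A =====
def aggregate_obs (hunter_obs : List (List Int)) (prey_obs : List Int) : List (List Int) :=
  (PySem.List.pyRange 0 (hunter_obs.length : Int) 1).foldl (fun final_obs idx =>
    let ordered0 := PySem.List.pyGetD hunter_obs idx []
    let ordered1 := (PySem.List.slice hunter_obs none (some idx)).foldl (fun o e => o ++ e) ordered0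
    let ordered2 := (PySem.List.slice hunter_obs (some (idx + 1)) none).foldl (fun o e => o ++ e) ordered1
    final_obs ++ [ordered2 ++ prey_obs]) []

-- ===== PORT B =====
def aggregate_obs_alt (hunter_obs : List (List Int)) (prey_obs : List Int) : List (List Int) :=
  let st := hunter_obs.foldl (fun (st : List Int × List Int) obs =>
      let af := st.1 ++ obs
      (af, st.2 ++ [(af.length : Int)])) ([], [(0 : Int)])
  (PySem.List.pyRange 0 (hunter_obs.length : Int) 1).map (fun i =>
    PySem.List.pyGetD hunter_obs i [] ++
    PySem.List.slice st.1 none (some (PySem.List.pyGetD st.2 i 0)) ++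
    PySem.List.slice st.1 (some (PySem.List.pyGetD st.2 (i + 1) 0)) none ++
    prey_obs)

-- ===== PRECONDITION & SPEC =====
def Spec_aggregate_obs (hunter_obs : List (List Int)) (prey_obs : List Int) (out : List (List Int)) : Prop := out = aggregate_obs_alt hunter_obs prey_obs
instance (hunter_obs : List (List Int)) (prey_obs : List Int) (out : List (List Int)) : Decidable (Spec_aggregate_obs hunter_obs prey_obs out) := by unfold Spec_aggregate_obs; infer_instance

-- ===== CLAIM (what is proved, stated in full; the proofs are below) =====
def Claim_equal_aggregate_obs : Prop := ∀ (hunter_obs : List (List Int)) (prey_obs : List Int), Dom_aggregate_obs hunter_obs prey_obs → Spec_aggregate_obs hunter_obs prey_obs (aggregate_obs hunter_obs prey_obs)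

-- ===== LEMMAS AND PROOFS =====

-- folding (++) over a list of lists appends its flatten
lemma foldl_append_flatten (l : List (List Int)) (init : List Int) :
    l.foldl (fun o e => o ++ e) init = init ++ l.flatten := by
  induction l generalizing init with
  | nil => simp
  | cons a t ih => simp [ih, List.append_assoc]

-- accumulating singletons with foldl is a map
lemma foldl_snoc_map (f : Int → List Int) (l : List Int) (init : List (List Int)) :
    l.foldl (fun acc i => acc ++ [f i]) init = init ++ l.map f := by
  induction l generalizing init with
  | nil => simp
  | cons a t ih => simp [ih]

-- characterisation of B's flattening pass: final all_flat and offset table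
lemma stateB (h : List (List Int)) : ∀ (af off : List Int),
    h.foldl (fun (st : List Int × List Int) obs =>
      let a := st.1 ++ obs
      (a, st.2 ++ [(a.length : Int)])) (af, off)
    = (af ++ h.flatten,
       off ++ (List.range h.length).map (fun j => ((af ++ (h.take (j + 1)).flatten).length : Int))) := by
  induction h with
  | nil => intro af off; simp
  | cons a t ih =>
    intro af off
    simp only [List.foldl_cons]
    rw [ih]
    simp [List.range_succ_eq_map, List.map_map, List.append_assoc, Function.comp]
  
-- prefix of the flat table is the flatten of the prefix
lemma take_flatten (h : List (List Int)) (j : Nat) :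
    h.flatten.take ((h.take j).flatten).length = (h.take j).flatten := by
  have key : h.flatten = (h.take j).flatten ++ (h.drop j).flatten := by
    rw [← List.flatten_append, List.take_append_drop]
  rw [key, List.take_left]

lemma drop_flatten (h : List (List Int)) (j : Nat) :
    h.flatten.drop ((h.take j).flatten).length = (h.drop j).flatten := by
  have key : h.flatten = (h.take j).flatten ++ (h.drop j).flatten := by
    rw [← List.flatten_append, List.take_append_drop]
  rw [key, List.drop_left]

-- the offset table is the prefix-length table over range (n+1)
lemma off_eq (h : List (List Int)) :
    ([(0 : Int)] ++ (List.range h.length).map (fun j => (((h.take (j + 1)).flatten).length : Int)))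
    = (List.range (h.length + 1)).map (fun j => (((h.take j).flatten).length : Int)) := by
  rw [List.range_succ_eq_map]
  simp [List.map_map, Function.comp]

-- indexing the offset table
lemma getD_off (h : List (List Int)) (k : Nat) (hk : k < h.length + 1) :
    PySem.List.pyGetD ((List.range (h.length + 1)).map (fun j => (((h.take j).flatten).length : Int))) ((k : Nat) : Int) 0
    = (((h.take k).flatten).length : Int) := by
  rw [PySem.List.pyGetD_natCast, List.getD_eq_getElem?_getD, List.getElem?_map,
      List.getElem?_range hk]
  rfl

-- ===== VERDICT (by name: the statement is the Claim_ definition above) =====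
theorem aggregate_obs_spec : Claim_equal_aggregate_obs := by
  intro h p _
  unfold Spec_aggregate_obs aggregate_obs aggregate_obs_alt
  simp only [stateB, List.nil_append]
  rw [foldl_snoc_map (fun idx =>
        ((PySem.List.slice h (some (idx + 1)) none).foldl (fun o e => o ++ e)
          ((PySem.List.slice h none (some idx)).foldl (fun o e => o ++ e)
            (PySem.List.pyGetD h idx []))) ++ p)]
  rw [List.nil_append]
  apply List.map_congr_left
  intro i hm
  obtain ⟨hi0, hin⟩ := (PySem.List.mem_pyRange_one).mp hm
  obtain ⟨j, rfl⟩ : ∃ j : Nat, i = (j : Int) := ⟨i.toNat, (Int.toNat_of_nonneg hi0).symm⟩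
  have hcast : ((j : Int) + 1) = ((j + 1 : Nat) : Int) := by push_cast; ring
  have hj : j < h.length := by exact_mod_cast hin
  rw [foldl_append_flatten, foldl_append_flatten, PySem.List.slice_to_natCast,
      hcast, PySem.List.slice_from_natCast, off_eq,
      getD_off h j (by omega), getD_off h (j + 1) (by omega),
      PySem.List.slice_to_natCast, PySem.List.slice_from_natCast,
      take_flatten, drop_flatten]
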